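-- pv_equiv track=rewrite | github.com/theredbluepill/arc-interactive | scripts/registry_ph_bn_bi_gif.py | _bn_revealed
-- ===== SOURCE A (Python) =====
-- def _bn_revealed(beacons: tuple[tuple[int, int], ...], r: int, gw: int, gh: int) -> set[tuple[int, int]]:
--     out: set[tuple[int, int]] = set()
--     if r < 0:
--         return out
--     for bx, by in beacons:
--         for y in range(by - r, by + r + 1):
--             for x in range(bx - r, bx + r + 1):
--                 if abs(x - bx) + abs(y - by) <= r:
--                     if 0 <= x < gw and 0 <= y < gh:
--                         out.add((x, y))
--     return out
-- ===== SOURCE B (Python) =====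
-- def _bn_revealed(beacons, r, gw, gh):
--     if r < 0:
--         return set()
--     # Stage 1: radius-r diamond as a run-length stencil, one (dy, dx_lo, dx_hi) half-open run per row, built once.
--     runs = [(dy, abs(dy) - r, r + 1 - abs(dy)) for dy in range(-r, r + 1)]
--     # Stage 2: translate the stencil to every beacon and clip each run to the grid.
--     spans = []
--     for bx, by in beacons:
--         for dy, dlo, dhi in runs:
--             y = by + dy
--             if 0 <= y < gh:
--                 spans.append((y, max(0, bx + dlo), min(gw, bx + dhi)))
--     # Stage 3: expand the clipped runs into cells.
--     return {(x, y) for y, lo, hi in spans for x in range(lo, hi)}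
-- ===== Notes on version B (the rewrite author's own statement) =====
-- stated objective: alternative
-- what changed: B is a staged pipeline over a run-length representation: it builds the radius-r diamond once as a per-row (dy, dx_lo, dx_hi) run stencil, translates and grid-clips that stencil into a list of spans for every beacon, and only then expands the spans into cells, instead of A's triple nested loop that tests every cell of each beacon's (2r+1)x(2r+1) bounding square with an abs-distance and bounds filter.
import Mathlib
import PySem

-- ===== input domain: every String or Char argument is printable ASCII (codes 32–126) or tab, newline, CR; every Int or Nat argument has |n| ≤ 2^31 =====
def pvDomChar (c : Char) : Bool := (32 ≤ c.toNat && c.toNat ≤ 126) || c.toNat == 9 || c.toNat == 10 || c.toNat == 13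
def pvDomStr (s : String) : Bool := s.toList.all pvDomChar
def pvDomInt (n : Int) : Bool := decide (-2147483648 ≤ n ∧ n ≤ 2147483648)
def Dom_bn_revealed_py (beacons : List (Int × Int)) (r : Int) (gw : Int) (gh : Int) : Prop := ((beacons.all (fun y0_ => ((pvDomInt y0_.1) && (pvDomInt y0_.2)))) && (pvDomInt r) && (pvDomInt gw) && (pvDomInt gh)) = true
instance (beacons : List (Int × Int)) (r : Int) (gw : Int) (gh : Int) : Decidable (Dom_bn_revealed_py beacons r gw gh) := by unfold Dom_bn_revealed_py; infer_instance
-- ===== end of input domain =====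

-- B restructures A's per-cell triple loop into a staged run-length pipeline: build the diamond's
-- per-row run stencil once, translate+clip it to spans for every beacon, then expand the spans (alternative decomposition).

-- ===== PORT A =====
def bn_revealed_py (beacons : List (Int × Int)) (r : Int) (gw : Int) (gh : Int) : List (Int × Int) :=
  if r < 0 then PySem.Set.empty
  else
    beacons.foldl (fun out p =>
      (PySem.List.pyRange (p.2 - r) (p.2 + r + 1) 1).foldl (fun out y =>
        (PySem.List.pyRange (p.1 - r) (p.1 + r + 1) 1).foldl (fun out x =>
          if |x - p.1| + |y - p.2| ≤ r then
            if 0 ≤ x ∧ x < gw ∧ 0 ≤ y ∧ y < gh then PySem.Set.add out (x, y) else out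
          else out) out) out) PySem.Set.empty

-- ===== PORT B =====
def bn_revealed_py_alt (beacons : List (Int × Int)) (r : Int) (gw : Int) (gh : Int) : List (Int × Int) :=
  if r < 0 then PySem.Set.empty
  else
    let runs := (PySem.List.pyRange (-r) (r + 1) 1).map (fun dy => (dy, |dy| - r, r + 1 - |dy|))
    let spans := beacons.foldl (fun spans p =>
      runs.foldl (fun spans q =>
        if 0 ≤ p.2 + q.1 ∧ p.2 + q.1 < gh then
          spans ++ [(p.2 + q.1, max 0 (p.1 + q.2.1), min gw (p.1 + q.2.2))]
        else spans) spans) ([] : List (Int × Int × Int))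
    spans.foldl (fun out s =>
      (PySem.List.pyRange s.2.1 s.2.2 1).foldl (fun out x => PySem.Set.add out (x, s.1)) out)
      PySem.Set.empty

-- ===== PRECONDITION & SPEC =====
def Spec_bn_revealed_py (beacons : List (Int × Int)) (r : Int) (gw : Int) (gh : Int) (out : List (Int × Int)) : Prop := out = bn_revealed_py_alt beacons r gw gh
instance (beacons : List (Int × Int)) (r : Int) (gw : Int) (gh : Int) (out : List (Int × Int)) : Decidable (Spec_bn_revealed_py beacons r gw gh out) := by unfold Spec_bn_revealed_py; infer_instance

-- ===== CLAIM (what is proved, stated in full; the proofs are below) =====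
def Claim_equal_bn_revealed_py : Prop := ∀ (beacons : List (Int × Int)) (r : Int) (gw : Int) (gh : Int), Dom_bn_revealed_py beacons r gw gh → Spec_bn_revealed_py beacons r gw gh (bn_revealed_py beacons r gw gh)

-- ===== LEMMAS AND PROOFS =====

-- A's per-beacon step (proof abbreviation)
def pvAStep (r gw gh : Int) (out : List (Int × Int)) (p : Int × Int) : List (Int × Int) :=
  (PySem.List.pyRange (p.2 - r) (p.2 + r + 1) 1).foldl (fun out y =>
    (PySem.List.pyRange (p.1 - r) (p.1 + r + 1) 1).foldl (fun out x =>
      if |x - p.1| + |y - p.2| ≤ r then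
        if 0 ≤ x ∧ x < gw ∧ 0 ≤ y ∧ y < gh then PySem.Set.add out (x, y) else out
      else out) out) out

-- B's per-beacon span-collection step (proof abbreviation)
def pvBStep (r gw gh : Int) (spans : List (Int × Int × Int)) (p : Int × Int) : List (Int × Int × Int) :=
  ((PySem.List.pyRange (-r) (r + 1) 1).map (fun dy => (dy, |dy| - r, r + 1 - |dy|))).foldl
    (fun spans q =>
      if 0 ≤ p.2 + q.1 ∧ p.2 + q.1 < gh then
        spans ++ [(p.2 + q.1, max 0 (p.1 + q.2.1), min gw (p.1 + q.2.2))]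
      else spans) spans

-- B's span-expansion fold (proof abbreviation)
def pvExpand (sp : List (Int × Int × Int)) (out : List (Int × Int)) : List (Int × Int) :=
  sp.foldl (fun out s =>
    (PySem.List.pyRange s.2.1 s.2.2 1).foldl (fun out x => PySem.Set.add out (x, s.1)) out) out

-- a fold whose every step is the identity returns its initial accumulator
theorem pv_foldl_id {α β : Type} (F : β → α → β) (l : List α) (init : β)
    (h : ∀ s x, x ∈ l → F s x = s) : l.foldl F init = init := by
  induction l generalizing init with
  | nil => rfl
  | cons a t ih =>
    rw [List.foldl_cons, h init a (List.mem_cons_self)]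
    exact ih init (fun s x hx => h s x (List.mem_cons_of_mem _ hx))

-- dropping the elements on which every step is the identity does not change a fold
theorem pv_foldl_filter {α β : Type} (F : β → α → β) (P : α → Bool) (l : List α) (init : β)
    (h : ∀ s x, x ∈ l → P x = false → F s x = s) :
    l.foldl F init = (l.filter P).foldl F init := by
  induction l generalizing init with
  | nil => rfl
  | cons a t ih =>
    by_cases hp : P a = true
    · rw [List.filter_cons_of_pos hp, List.foldl_cons, List.foldl_cons]
      exact ih (F init a) (fun s x hx => h s x (List.mem_cons_of_mem _ hx))
    · have hpf : P a = false := by simpa using hp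
      rw [List.filter_cons_of_neg (by simp [hpf]), List.foldl_cons,
        h init a (List.mem_cons_self) hpf]
      exact ih init (fun s x hx => h s x (List.mem_cons_of_mem _ hx))

-- a conditional-append fold collects the filtered, mapped elements
theorem pv_foldl_append_if {α β : Type} (P : α → Prop) [DecidablePred P] (f : α → β)
    (l : List α) (acc : List β) :
    l.foldl (fun acc x => if P x then acc ++ [f x] else acc) acc
      = acc ++ (l.filter (fun x => decide (P x))).map f := by
  induction l generalizing acc with
  | nil => simp
  | cons a t ih =>
    by_cases hp : P a
    · rw [List.foldl_cons, if_pos hp, ih, List.filter_cons_of_pos (by simpa using hp)]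
      simp
    · rw [List.foldl_cons, if_neg hp, ih, List.filter_cons_of_neg (by simpa using hp)]

-- filtering an integer range by an interval predicate yields the intersected range
theorem pv_filter_pyRange (a b lo hi : Int) (P : Int → Bool)
    (h1 : ∀ x, a ≤ x → x < b → (P x = true ↔ lo ≤ x ∧ x < hi))
    (h2 : ∀ x, lo ≤ x → x < hi → a ≤ x ∧ x < b) :
    (PySem.List.pyRange a b 1).filter P = PySem.List.pyRange lo hi 1 := by
  have hmem : ∀ x, x ∈ (PySem.List.pyRange a b 1).filter P ↔ x ∈ PySem.List.pyRange lo hi 1 := by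
    intro x
    simp only [List.mem_filter, PySem.List.mem_pyRange_one]
    constructor
    · rintro ⟨⟨hx1, hx2⟩, hp⟩; exact (h1 x hx1 hx2).1 hp
    · rintro ⟨hx1, hx2⟩
      obtain ⟨ha, hb⟩ := h2 x hx1 hx2
      exact ⟨⟨ha, hb⟩, (h1 x ha hb).2 ⟨hx1, hx2⟩⟩
  have hn1 : ((PySem.List.pyRange a b 1).filter P).Nodup :=
    (PySem.List.nodup_pyRange_one a b).filter P
  have hperm := (List.perm_ext_iff_of_nodup hn1 (PySem.List.nodup_pyRange_one lo hi)).mpr hmem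
  exact List.Perm.eq_of_pairwise (fun x y _ _ h h' => le_antisymm h.le h'.le)
    ((PySem.List.pairwise_lt_pyRange_one a b).filter P)
    (PySem.List.pairwise_lt_pyRange_one lo hi) hperm

-- translating the filtered dy-stencil rows gives the grid-clipped y-range
theorem pv_clip_range (c r gh : Int) :
    ((PySem.List.pyRange (-r) (r + 1) 1).filter
        (fun dy => decide (0 ≤ c + dy ∧ c + dy < gh))).map (fun dy => c + dy)
      = PySem.List.pyRange (max 0 (c - r)) (min gh (c + r + 1)) 1 := by
  have hmem : ∀ y, y ∈ ((PySem.List.pyRange (-r) (r + 1) 1).filter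
        (fun dy => decide (0 ≤ c + dy ∧ c + dy < gh))).map (fun dy => c + dy)
      ↔ y ∈ PySem.List.pyRange (max 0 (c - r)) (min gh (c + r + 1)) 1 := by
    intro y
    simp only [List.mem_map, List.mem_filter, PySem.List.mem_pyRange_one, decide_eq_true_eq]
    constructor
    · rintro ⟨dy, ⟨⟨h1, h2⟩, h3, h4⟩, rfl⟩; omega
    · intro hy; exact ⟨y - c, by omega, by omega⟩
  have hn1 : (((PySem.List.pyRange (-r) (r + 1) 1).filter
      (fun dy => decide (0 ≤ c + dy ∧ c + dy < gh))).map (fun dy => c + dy)).Nodup := by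
    apply List.Nodup.map (fun a b h => by omega)
    exact (PySem.List.nodup_pyRange_one _ _).filter _
  have hp1 : (((PySem.List.pyRange (-r) (r + 1) 1).filter
      (fun dy => decide (0 ≤ c + dy ∧ c + dy < gh))).map (fun dy => c + dy)).Pairwise (· < ·) :=
    List.Pairwise.map _ (fun {a b} h => by omega)
      ((PySem.List.pairwise_lt_pyRange_one _ _).filter _)
  have hperm := (List.perm_ext_iff_of_nodup hn1 (PySem.List.nodup_pyRange_one _ _)).mpr hmem
  exact List.Perm.eq_of_pairwise (fun x y _ _ h h' => le_antisymm h.le h'.le)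
    hp1 (PySem.List.pairwise_lt_pyRange_one _ _) hperm

-- one row of the diamond: A's filtered scan of [bx-r, bx+r] equals the closed-form x-run
theorem pv_row (gw gh r bx by_ y : Int) (hy0 : 0 ≤ y) (hyg : y < gh) (hw : |y - by_| ≤ r)
    (s : List (Int × Int)) :
    (PySem.List.pyRange (bx - r) (bx + r + 1) 1).foldl (fun out x =>
        if |x - bx| + |y - by_| ≤ r then
          if 0 ≤ x ∧ x < gw ∧ 0 ≤ y ∧ y < gh then PySem.Set.add out (x, y) else out
        else out) s
      = (PySem.List.pyRange (max 0 (bx - (r - |y - by_|))) (min gw (bx + (r - |y - by_|) + 1)) 1).foldl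
          (fun out x => PySem.Set.add out (x, y)) s := by
  set P : Int → Bool := fun x => decide (|x - bx| + |y - by_| ≤ r ∧ 0 ≤ x ∧ x < gw) with hP
  have hid : ∀ (t : List (Int × Int)) x, x ∈ PySem.List.pyRange (bx - r) (bx + r + 1) 1 →
      P x = false →
      (if |x - bx| + |y - by_| ≤ r then
        if 0 ≤ x ∧ x < gw ∧ 0 ≤ y ∧ y < gh then PySem.Set.add t (x, y) else t
      else t) = t := by
    intro t x _ hfalse
    rw [hP] at hfalse
    simp only [decide_eq_false_iff_not, not_and, not_lt] at hfalse
    split_ifs with ha hb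
    · exact absurd (hfalse ha hb.1) (by omega)
    · rfl
    · rfl
  rw [pv_foldl_filter _ P _ s hid]
  have hfil := pv_filter_pyRange (bx - r) (bx + r + 1)
      (max 0 (bx - (r - |y - by_|))) (min gw (bx + (r - |y - by_|) + 1)) P
      (by intro x _ _
          rw [hP]
          simp only [decide_eq_true_eq, Int.abs_eq_natAbs] at *
          omega)
      (by intro x _ _
          simp only [Int.abs_eq_natAbs] at *
          omega)
  rw [hfil]
  apply PySem.List.foldl_congr_mem
  intro acc x hx
  rw [PySem.List.mem_pyRange_one] at hx
  have habs : |x - bx| + |y - by_| ≤ r := by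
    simp only [Int.abs_eq_natAbs] at *; omega
  rw [if_pos habs, if_pos ⟨by omega, by omega, hy0, hyg⟩]

-- one beacon on A's side: the unclipped y-scan equals the clipped closed-form row folds
theorem pv_beacon (r gw gh : Int) (p : Int × Int) (s : List (Int × Int)) :
    pvAStep r gw gh s p
      = (PySem.List.pyRange (max 0 (p.2 - r)) (min gh (p.2 + r + 1)) 1).foldl (fun out y =>
          (PySem.List.pyRange (max 0 (p.1 - (r - |y - p.2|))) (min gw (p.1 + (r - |y - p.2|) + 1)) 1).foldl
            (fun out x => PySem.Set.add out (x, y)) out) s := by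
  unfold pvAStep
  set P : Int → Bool := fun y => decide (0 ≤ y ∧ y < gh) with hP
  have hid : ∀ (t : List (Int × Int)) y, y ∈ PySem.List.pyRange (p.2 - r) (p.2 + r + 1) 1 →
      P y = false →
      (PySem.List.pyRange (p.1 - r) (p.1 + r + 1) 1).foldl (fun out x =>
        if |x - p.1| + |y - p.2| ≤ r then
          if 0 ≤ x ∧ x < gw ∧ 0 ≤ y ∧ y < gh then PySem.Set.add out (x, y) else out
        else out) t = t := by
    intro t y _ hfalse
    rw [hP] at hfalse
    simp only [decide_eq_false_iff_not, not_and, not_lt] at hfalse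
    apply pv_foldl_id
    intro u x _
    split_ifs with ha hb
    · exact absurd (hfalse hb.2.2.1) (by omega)
    · rfl
    · rfl
  rw [pv_foldl_filter _ P _ s hid]
  have hfil := pv_filter_pyRange (p.2 - r) (p.2 + r + 1) (max 0 (p.2 - r)) (min gh (p.2 + r + 1)) P
      (by intro y _ _; rw [hP]; simp only [decide_eq_true_eq]; omega)
      (by intro y _ _; omega)
  rw [hfil]
  apply PySem.List.foldl_congr_mem
  intro acc y hy
  rw [PySem.List.mem_pyRange_one] at hy
  exact pv_row gw gh r p.1 p.2 y (by omega) (by omega)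
    (by simp only [Int.abs_eq_natAbs]; omega) acc

-- one beacon on B's side: collecting then expanding its spans equals A's per-beacon step
theorem pv_bbeacon (r gw gh : Int) (p : Int × Int) (spans0 : List (Int × Int × Int))
    (out : List (Int × Int)) :
    pvExpand (pvBStep r gw gh spans0 p) out = pvAStep r gw gh (pvExpand spans0 out) p := by
  unfold pvBStep
  rw [pv_foldl_append_if (fun q : Int × Int × Int => 0 ≤ p.2 + q.1 ∧ p.2 + q.1 < gh)
      (fun q => (p.2 + q.1, max 0 (p.1 + q.2.1), min gw (p.1 + q.2.2)))]
  rw [List.filter_map, List.map_map]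
  unfold pvExpand
  rw [List.foldl_append, List.foldl_map]
  rw [pv_beacon]
  have hmaps :
      ((PySem.List.pyRange (-r) (r + 1) 1).filter
          (fun dy => decide (0 ≤ p.2 + dy ∧ p.2 + dy < gh))).map (fun dy => p.2 + dy)
        = PySem.List.pyRange (max 0 (p.2 - r)) (min gh (p.2 + r + 1)) 1 := pv_clip_range p.2 r gh
  calc ((PySem.List.pyRange (-r) (r + 1) 1).filter
          (fun dy => decide (0 ≤ p.2 + dy ∧ p.2 + dy < gh))).foldl
        (fun acc dy =>
          (PySem.List.pyRange (max 0 (p.1 + (|dy| - r))) (min gw (p.1 + (r + 1 - |dy|))) 1).foldl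
            (fun out x => PySem.Set.add out (x, p.2 + dy)) acc)
        (spans0.foldl (fun out s =>
          (PySem.List.pyRange s.2.1 s.2.2 1).foldl (fun out x => PySem.Set.add out (x, s.1)) out) out)
      = (((PySem.List.pyRange (-r) (r + 1) 1).filter
          (fun dy => decide (0 ≤ p.2 + dy ∧ p.2 + dy < gh))).map (fun dy => p.2 + dy)).foldl
        (fun acc y =>
          (PySem.List.pyRange (max 0 (p.1 - (r - |y - p.2|))) (min gw (p.1 + (r - |y - p.2|) + 1)) 1).foldl
            (fun out x => PySem.Set.add out (x, y)) acc)
        (spans0.foldl (fun out s =>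
          (PySem.List.pyRange s.2.1 s.2.2 1).foldl (fun out x => PySem.Set.add out (x, s.1)) out) out) := by
        rw [List.foldl_map]
        apply PySem.List.foldl_congr_mem
        intro acc dy _
        have h1 : max 0 (p.1 + (|dy| - r)) = max 0 (p.1 - (r - |p.2 + dy - p.2|)) := by
          have : |p.2 + dy - p.2| = |dy| := by ring_nf
          rw [this]; omega
        have h2 : min gw (p.1 + (r + 1 - |dy|)) = min gw (p.1 + (r - |p.2 + dy - p.2|) + 1) := by
          have : |p.2 + dy - p.2| = |dy| := by ring_nf
          rw [this]; omega
        rw [h1, h2]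
    _ = _ := by rw [hmaps]

-- interleaving: expanding B's accumulated spans equals folding A's per-beacon steps
theorem pv_interleave (r gw gh : Int) (beacons : List (Int × Int))
    (spans0 : List (Int × Int × Int)) (out : List (Int × Int)) :
    pvExpand (beacons.foldl (pvBStep r gw gh) spans0) out
      = beacons.foldl (pvAStep r gw gh) (pvExpand spans0 out) := by
  induction beacons generalizing spans0 out with
  | nil => rfl
  | cons p bs ih =>
    rw [List.foldl_cons, List.foldl_cons, ih, pv_bbeacon]

-- ===== VERDICT (by name: the statement is the Claim_ definition above) =====
theorem bn_revealed_py_spec : Claim_equal_bn_revealed_py := by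
  intro beacons r gw gh _
  show bn_revealed_py beacons r gw gh = bn_revealed_py_alt beacons r gw gh
  unfold bn_revealed_py bn_revealed_py_alt
  by_cases hr : r < 0
  · rw [if_pos hr, if_pos hr]
  · rw [if_neg hr, if_neg hr]
    have h := pv_interleave r gw gh beacons [] PySem.Set.empty
    unfold pvExpand pvBStep pvAStep at h
    simpa using h.symm
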